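-- pv_equiv track=rewrite | github.com/xtawb/cloudaudit | cloudaudit/scanners/secret_scanner.py | _context_snippet
-- ===== SOURCE A (Python) =====
-- def _context_snippet(content: str, pos: int, radius: int = 3) -> str:
--     lines = content.split("\n")
--     cur   = 0
--     for i, line in enumerate(lines):
--         if cur + len(line) + 1 > pos:
--             lo = max(0, i - radius)
--             hi = min(len(lines), i + radius + 1)
--             return "\n".join(lines[lo:hi])
--         cur += len(line) + 1
--     return ""
-- ===== SOURCE B (Python) =====
-- def _context_snippet(content: str, pos: int, radius: int = 3) -> str:
--     if pos > len(content):
--         return ""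
--     lines = content.split("\n")
--     i = content[:max(pos, 0)].count("\n")
--     lo = max(0, i - radius)
--     hi = min(len(lines), i + radius + 1)
--     return "\n".join(lines[lo:hi])
-- ===== Notes on version B (the rewrite author's own statement) =====
-- stated objective: simpler
-- what changed: Replaces A's offset-accumulating scan over the split lines with a direct computation of the line index as the newline count of content[:max(pos,0)] (plus the explicit pos > len(content) empty-result case), reusing the same window arithmetic.
import Mathlib
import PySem

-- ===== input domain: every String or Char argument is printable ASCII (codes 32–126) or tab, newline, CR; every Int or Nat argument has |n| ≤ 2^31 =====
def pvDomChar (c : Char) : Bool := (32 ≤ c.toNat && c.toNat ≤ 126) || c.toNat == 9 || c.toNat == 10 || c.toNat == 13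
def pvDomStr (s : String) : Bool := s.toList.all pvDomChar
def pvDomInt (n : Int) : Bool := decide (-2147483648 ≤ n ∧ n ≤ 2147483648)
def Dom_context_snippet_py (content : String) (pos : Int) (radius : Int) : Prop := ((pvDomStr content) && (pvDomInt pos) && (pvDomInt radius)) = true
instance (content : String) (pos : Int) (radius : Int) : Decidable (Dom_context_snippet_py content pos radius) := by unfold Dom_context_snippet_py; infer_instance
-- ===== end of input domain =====

-- B replaces A's offset-accumulating scan over the lines by a single prefix newline count
-- (i = content[:max(pos,0)].count("\n")) plus the same window arithmetic; objective: simpler.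

-- ===== PORT A =====
-- loop over the enumerated lines, carrying the running character offset `cur`
def pvAGo (lines : List (List Char)) (radius pos : Int) : List (List Char) → Int → Int → List Char
  | [], _, _ => []
  | l :: rest, i, cur =>
    if cur + (PySem.Chars.len l : Int) + 1 > pos then
      PySem.Chars.join ['\n'] (PySem.List.slice lines (some (max 0 (i - radius))) (some (min ((lines.length : Int)) (i + radius + 1))))
    else pvAGo lines radius pos rest (i + 1) (cur + (PySem.Chars.len l : Int) + 1)

def context_snippet_py (content : String) (pos : Int) (radius : Int) : String :=
  let lines := PySem.Chars.splitOn content.toList ['\n']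
  String.ofList (pvAGo lines radius pos lines 0 0)

-- ===== PORT B =====
def context_snippet_py_alt (content : String) (pos : Int) (radius : Int) : String :=
  let cl := content.toList
  if pos > (PySem.Chars.len cl : Int) then ""
  else
    let lines := PySem.Chars.splitOn cl ['\n']
    let i : Int := (PySem.Chars.count (PySem.List.slice cl none (some (max pos 0))) ['\n'] : Int)
    String.ofList (PySem.Chars.join ['\n'] (PySem.List.slice lines (some (max 0 (i - radius))) (some (min ((lines.length : Int)) (i + radius + 1)))))

-- ===== PRECONDITION & SPEC =====
def Spec_context_snippet_py (content : String) (pos : Int) (radius : Int) (out : String) : Prop := out = context_snippet_py_alt content pos radius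
instance (content : String) (pos : Int) (radius : Int) (out : String) : Decidable (Spec_context_snippet_py content pos radius out) := by unfold Spec_context_snippet_py; infer_instance

-- ===== CLAIM (what is proved, stated in full; the proofs are below) =====
def Claim_equal_context_snippet_py : Prop := ∀ (content : String) (pos : Int) (radius : Int), Dom_context_snippet_py content pos radius → Spec_context_snippet_py content pos radius (context_snippet_py content pos radius)

-- ===== LEMMAS AND PROOFS =====

theorem pvModifyHead_id {α : Type} (l : List α) : List.modifyHead (fun x => x) l = l := by
  cases l <;> simp

theorem pvIntercalate_cons₂ (c : Char) (l m : List Char) (r : List (List Char)) :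
    List.intercalate [c] (l :: m :: r) = l ++ [c] ++ List.intercalate [c] (m :: r) := by
  simp [List.intercalate]

theorem pvIntercalate_single (c : Char) (l : List Char) : List.intercalate [c] [l] = l := by
  simp [List.intercalate]

-- s.count("\n") for a single-character needle is List.count
theorem pvCountGo_single (c : Char) : ∀ (cs : List Char) (fuel acc : Nat), cs.length ≤ fuel →
    PySem.Chars.count.go [c] fuel cs acc = acc + cs.count c := by
  intro cs
  induction cs with
  | nil => intro fuel acc _; cases fuel <;> simp [PySem.Chars.count.go]
  | cons h t ih =>
    intro fuel acc hf
    cases fuel with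
    | zero => simp at hf
    | succ f =>
      have hpre : [c].isPrefixOf (h :: t) = (c == h) := by simp [List.isPrefixOf]
      simp only [PySem.Chars.count.go, hpre, List.length_cons, List.length_nil,
        List.drop_succ_cons, List.drop_zero]
      by_cases hc : c = h
      · rw [if_pos (by simp [hc]), ih f (acc + 1) (by simpa using hf)]
        simp [hc]
        omega
      · rw [if_neg (by simp [hc]), ih f acc (by simpa using hf)]
        simp [Ne.symm hc]

theorem pvCount_single (cs : List Char) (c : Char) : PySem.Chars.count cs [c] = cs.count c := by
  simp [PySem.Chars.count, pvCountGo_single c cs cs.length 0 le_rfl]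

-- PySem's split("\n") is Mathlib's List.splitOn
theorem pvSplitGo_single (c : Char) : ∀ (cs : List Char) (fuel : Nat) (cur : List Char) (acc : List (List Char)), cs.length ≤ fuel →
    PySem.Chars.splitOn.go [c] fuel cs cur acc = acc.reverse ++ (cs.splitOn c).modifyHead (cur.reverse ++ ·) := by
  intro cs
  induction cs with
  | nil => intro fuel cur acc _; cases fuel <;> simp [PySem.Chars.splitOn.go, List.splitOn, List.splitOnP_nil]
  | cons h t ih =>
    intro fuel cur acc hf
    cases fuel with
    | zero => simp at hf
    | succ f =>
      have hpre : [c].isPrefixOf (h :: t) = (c == h) := by simp [List.isPrefixOf]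
      simp only [PySem.Chars.splitOn.go, hpre, List.length_cons, List.length_nil,
        List.drop_succ_cons, List.drop_zero]
      by_cases hc : c = h
      · rw [if_pos (by simp [hc]), ih f [] (cur.reverse :: acc) (by simpa using hf)]
        simp [List.splitOn, List.splitOnP_cons, hc.symm, pvModifyHead_id]
      · rw [if_neg (by simp [hc]), ih f (h :: cur) acc (by simpa using hf)]
        simp only [List.splitOn, List.splitOnP_cons, beq_iff_eq, Ne.symm hc, if_false,
          List.modifyHead_modifyHead]
        cases List.splitOnP (fun x => x == c) t <;> simp

theorem pvSplit_single (cs : List Char) (c : Char) : PySem.Chars.splitOn cs [c] = cs.splitOn c := by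
  rw [PySem.Chars.splitOn, pvSplitGo_single c cs (cs.length + 1) [] [] (by omega)]
  simp [pvModifyHead_id]

-- no separator character occurs inside a piece of splitOn
theorem pvNotMem_splitOn (c : Char) : ∀ (cs : List Char) (l : List Char), l ∈ cs.splitOn c → c ∉ l := by
  intro cs
  induction cs with
  | nil => intro l hl; simp [List.splitOn, List.splitOnP_nil] at hl; simp [hl]
  | cons h t ih =>
    intro l hl
    by_cases hc : h = c
    · subst hc
      simp [List.splitOn, List.splitOnP_cons] at hl
      rcases hl with hl | hl
      · simp [hl]
      · exact ih l hl
    · simp only [List.splitOn, List.splitOnP_cons, beq_iff_eq, hc, if_false] at hl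
      rcases he : List.splitOnP (· == c) t with _ | ⟨hd, tl⟩
      · exact absurd he (List.splitOnP_ne_nil _ t)
      · rw [he] at hl
        simp only [List.modifyHead, List.mem_cons] at hl
        rcases hl with hl | hl
        · subst hl
          intro hm
          rcases List.mem_cons.mp hm with hm | hm
          · exact hc hm.symm
          · exact ih hd (by simp [List.splitOn, he]) hm
        · exact ih l (by simp [List.splitOn, he, List.mem_cons, hl])

-- total "len+1" weight of the lines
def pvS (lines : List (List Char)) : Nat := (lines.map (fun l => l.length + 1)).sum

theorem pvS_intercalate (c : Char) : ∀ (lines : List (List Char)), lines ≠ [] →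
    pvS lines = (List.intercalate [c] lines).length + 1 := by
  intro lines
  induction lines with
  | nil => intro h; exact absurd rfl h
  | cons l rest ih =>
    intro _
    cases rest with
    | nil => simp [pvS, List.intercalate]
    | cons m r =>
      have := ih (by simp)
      simp only [pvS, List.map_cons, List.sum_cons, pvIntercalate_cons₂, List.length_append,
        List.length_singleton] at *
      omega

-- index of the line containing character offset t (A's loop exit index)
def pvLineIdx : List (List Char) → Int → Nat
  | [], _ => 0
  | l :: rest, t => if (l.length : Int) + 1 > t then 0 else pvLineIdx rest (t - l.length - 1) + 1

theorem pvLineIdx_cons (l : List Char) (rest : List (List Char)) (t : Int) :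
    pvLineIdx (l :: rest) t = if (l.length : Int) + 1 > t then 0 else pvLineIdx rest (t - l.length - 1) + 1 := rfl

theorem pvLineIdx_count (c : Char) : ∀ (lines : List (List Char)), (∀ l ∈ lines, c ∉ l) →
    ∀ t : Int, t ≤ ((List.intercalate [c] lines).length : Int) →
    pvLineIdx lines t = ((List.intercalate [c] lines).take t.toNat).count c := by
  intro lines
  induction lines with
  | nil => intro _ t _; simp [pvLineIdx, List.intercalate]
  | cons l rest ih =>
    intro hmem t ht
    cases rest with
    | nil =>
      rw [pvIntercalate_single] at ht ⊢
      have h1 : (l.length : Int) + 1 > t := by omega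
      have h2 : t.toNat ≤ l.length := by omega
      simp only [pvLineIdx, h1, if_true]
      have : c ∉ l.take t.toNat := fun hm => hmem l (by simp) (List.mem_of_mem_take hm)
      simp [List.count_eq_zero.mpr this]
    | cons m r =>
      rw [pvIntercalate_cons₂, List.append_assoc] at ht ⊢
      by_cases h1 : (l.length : Int) + 1 > t
      · simp only [pvLineIdx, h1, if_true]
        have h2 : t.toNat ≤ l.length := by omega
        rw [List.take_append_of_le_length h2]
        have : c ∉ l.take t.toNat := fun hm => hmem l (by simp) (List.mem_of_mem_take hm)
        simp [List.count_eq_zero.mpr this]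
      · rw [pvLineIdx_cons, if_neg h1]
        have hlt : (l.length : Int) + 1 ≤ t := by omega
        have htn : t.toNat = l.length + (1 + (t - l.length - 1).toNat) := by omega
        rw [htn, List.take_length_add_append]
        have h3 : ([c] ++ List.intercalate [c] (m :: r)).take (1 + (t - l.length - 1).toNat)
            = [c] ++ (List.intercalate [c] (m :: r)).take ((t - l.length - 1).toNat) := by
          have : (1 + (t - l.length - 1).toNat) = ([c].length + (t - l.length - 1).toNat) := by simp
          rw [this, List.take_length_add_append]
        rw [h3]
        have hcl : c ∉ l := hmem l (by simp)
        rw [List.count_append, List.count_append, List.count_eq_zero.mpr hcl]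
        have hih := ih (fun x hx => hmem x (by simp [hx])) (t - l.length - 1)
          (by simp only [List.length_append, List.length_singleton] at ht ⊢; push_cast at ht ⊢; omega)
        rw [hih]
        simp
        omega

-- A's loop falls off the end when pos is past the whole content
theorem pvAGo_fall (lines : List (List Char)) (radius pos : Int) :
    ∀ (rest : List (List Char)) (i cur : Int), cur + (pvS rest : Int) ≤ pos →
    pvAGo lines radius pos rest i cur = [] := by
  intro rest
  induction rest with
  | nil => intro i cur _; simp [pvAGo]
  | cons l r ih =>
    intro i cur h
    have hS : (pvS (l :: r) : Int) = (l.length : Int) + 1 + (pvS r : Int) := by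
      simp only [pvS, List.map_cons, List.sum_cons]; push_cast; ring
    rw [hS] at h
    have hno : ¬ (cur + (PySem.Chars.len l : Int) + 1 > pos) := by
      simp only [PySem.Chars.len_eq]; omega
    simp only [pvAGo, hno, if_false]
    exact ih (i + 1) (cur + (PySem.Chars.len l : Int) + 1)
      (by simp only [PySem.Chars.len_eq]; omega)

-- A's loop returns the window around line (i + pvLineIdx rest (pos - cur))
theorem pvAGo_hit (lines : List (List Char)) (radius pos : Int) :
    ∀ (rest : List (List Char)) (i cur : Int), pos < cur + (pvS rest : Int) → (cur ≤ pos ∨ rest ≠ []) →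
    pvAGo lines radius pos rest i cur =
      PySem.Chars.join ['\n'] (PySem.List.slice lines
        (some (max 0 (i + (pvLineIdx rest (pos - cur) : Int) - radius)))
        (some (min ((lines.length : Int)) (i + (pvLineIdx rest (pos - cur) : Int) + radius + 1)))) := by
  intro rest
  induction rest with
  | nil =>
    intro i cur h hor
    rcases hor with hle | hne
    · simp [pvS] at h; omega
    · exact absurd rfl hne
  | cons l r ih =>
    intro i cur h hor
    have hS : (pvS (l :: r) : Int) = (l.length : Int) + 1 + (pvS r : Int) := by
      simp only [pvS, List.map_cons, List.sum_cons]; push_cast; ring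
    rw [hS] at h
    by_cases hc : cur + (PySem.Chars.len l : Int) + 1 > pos
    · have hidx : pvLineIdx (l :: r) (pos - cur) = 0 := by
        simp only [pvLineIdx]
        rw [if_pos (by simp only [PySem.Chars.len_eq] at hc; omega)]
      simp only [pvAGo]
      rw [if_pos hc, hidx]
      simp
    · have hcur' : cur + (PySem.Chars.len l : Int) + 1 ≤ pos := by omega
      have hidx : pvLineIdx (l :: r) (pos - cur) = pvLineIdx r (pos - (cur + l.length + 1)) + 1 := by
        simp only [pvLineIdx, PySem.Chars.len_eq] at hc ⊢
        rw [if_neg (by omega)]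
        congr 1
        ring_nf
      simp only [pvAGo, hc, if_false]
      rw [ih (i + 1) (cur + (PySem.Chars.len l : Int) + 1)
        (by simp only [PySem.Chars.len_eq]; omega)
        (Or.inl (by simp only [PySem.Chars.len_eq] at hcur' ⊢; omega))]
      simp only [PySem.Chars.len_eq] at *
      rw [hidx]
      congr 3 <;> push_cast <;> ring_nf

-- ===== VERDICT (by name: the statement is the Claim_ definition above) =====
theorem context_snippet_py_spec : Claim_equal_context_snippet_py := by
  intro content pos radius _
  unfold Spec_context_snippet_py
  simp only [context_snippet_py, context_snippet_py_alt]
  set cl := content.toList with hcl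
  rw [pvSplit_single]
  by_cases hbig : pos > (PySem.Chars.len cl : Int)
  · rw [if_pos hbig]
    rw [pvAGo_fall (List.splitOn '\n' cl) radius pos (List.splitOn '\n' cl) 0 0
      (by rw [pvS_intercalate '\n' (List.splitOn '\n' cl) (show List.splitOn '\n' cl ≠ [] from List.splitOnP_ne_nil _ cl), List.intercalate_splitOn]
          simp only [PySem.Chars.len_eq] at hbig
          push_cast; omega)]
  · rw [if_neg hbig]
    simp only [PySem.Chars.len_eq] at hbig
    rw [pvAGo_hit (List.splitOn '\n' cl) radius pos (List.splitOn '\n' cl) 0 0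
      (by rw [pvS_intercalate '\n' (List.splitOn '\n' cl) (show List.splitOn '\n' cl ≠ [] from List.splitOnP_ne_nil _ cl), List.intercalate_splitOn]
          push_cast; omega)
      (Or.inr (show List.splitOn '\n' cl ≠ [] from List.splitOnP_ne_nil _ cl))]
    have hslice : PySem.List.slice cl none (some (max pos 0)) = cl.take pos.toNat := by
      simp only [PySem.List.slice, PySem.List.clampIdx]
      rw [if_neg (by omega)]
      have : min (max pos 0).toNat cl.length = pos.toNat := by omega
      simp [this]
    rw [hslice, pvCount_single]
    have hidx : pvLineIdx (cl.splitOn '\n') pos = (cl.take pos.toNat).count '\n' := by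
      have := pvLineIdx_count '\n' (cl.splitOn '\n') (pvNotMem_splitOn '\n' cl) pos
        (by rw [List.intercalate_splitOn]; omega)
      rwa [List.intercalate_splitOn] at this
    simp [hidx]
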